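-- pv_equiv track=rewrite | github.com/agenitrini/BDDgen | unrank_bdd.py | to_TT
-- ===== SOURCE A (Python) =====
-- def to_TT(L):
--     """
--     return a string with the table truth
--     CAUTION: To debug !!!
--     """
--     n = len(L)
--     bead = dict()
--     bead[n-1]="0"
--     bead[n-2]="1"
--     for i_node in range(n-3, -1, -1):
--         if i_node not in bead:
--             level, delta  = L[i_node]
--             lo, hi = delta
--             lo, hi = abs(lo), abs(hi)
--             if level > 0:
--                 lo_bead = bead[lo]
--                 hi_bead = bead[hi]
--                 l0, _ = L[lo]
--                 l1, _ = L[hi]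
--                 d0 = level - l0 - 1
--                 d1 = level - l1 - 1
--                 bead[i_node] = lo_bead * (2**d0) +hi_bead*(2**d1)
--     return bead[0]
--
-- def abs(x):
--     if x >= 0:
--         return x
--     return -x
-- ===== SOURCE B (Python) =====
-- def to_TT(L):
--     """Memoized top-down recursion over the BDD from the root, instead of a
--     bottom-up scan of every array slot (unreachable nodes are never touched)."""
--     n = len(L)
--     memo = {n - 1: "0", n - 2: "1"}
--
--     def solve(i):
--         if i in memo:
--             return memo[i]
--         level, (lo, hi) = L[i]
--         lo, hi = abs(lo), abs(hi)
--         lo_bead, hi_bead = solve(lo), solve(hi)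
--         res = lo_bead * 2 ** (level - L[lo][0] - 1) + hi_bead * 2 ** (level - L[hi][0] - 1)
--         memo[i] = res
--         return res
--
--     return solve(0)
-- ===== Notes on version B (the rewrite author's own statement) =====
-- stated objective: alternative
-- what changed: Replaces A's bottom-up for-loop over every array index (building a bead string for each slot) with a memoized top-down recursion from the root node 0, visiting only nodes reachable via child pointers.
import Mathlib
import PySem

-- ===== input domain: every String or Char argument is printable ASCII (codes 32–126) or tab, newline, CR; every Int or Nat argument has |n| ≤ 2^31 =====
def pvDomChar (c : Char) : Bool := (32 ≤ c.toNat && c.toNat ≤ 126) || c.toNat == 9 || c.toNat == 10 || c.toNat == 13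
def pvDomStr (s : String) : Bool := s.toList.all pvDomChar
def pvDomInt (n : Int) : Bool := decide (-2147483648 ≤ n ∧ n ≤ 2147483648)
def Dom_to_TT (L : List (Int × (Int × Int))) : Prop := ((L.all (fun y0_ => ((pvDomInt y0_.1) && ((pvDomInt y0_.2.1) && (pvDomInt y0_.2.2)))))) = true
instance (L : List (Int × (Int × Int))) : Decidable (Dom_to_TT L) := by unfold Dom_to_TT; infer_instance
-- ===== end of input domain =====

-- B replaces A's bottom-up scan over every array index by a memoized top-down
-- recursion from the root, so only nodes reachable from node 0 are visited.

-- A-side primitives mirroring the Python operators A uses: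
-- the module-level helper abs(x)
def pvAbs (x : Int) : Int := if x ≥ 0 then x else -x
-- s * k on a string (k ≤ 0 gives ""): exact Python semantics for int k
def pyStrMul (s : String) (k : Int) : String := String.join (List.replicate k.toNat s)
-- 2 ** d: exact for d ≥ 0; for d < 0 Python yields a float and s*float raises
-- TypeError, which Pre_to_TT excludes
def pyPow2 (d : Int) : Int := 2 ^ d.toNat

-- ===== PORT A =====
def to_TT (L : List (Int × (Int × Int))) : String :=
  let n : Int := (L.length : Int)
  let bead : PySem.Dict Int String := (PySem.Dict.empty.insert (n - 1) "0").insert (n - 2) "1"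
  let bead := (PySem.List.pyRange (n - 3) (-1) (-1)).foldl (fun bead i_node =>
    if bead.contains i_node then bead
    else
      match PySem.List.pyGet? L i_node with
      | none => bead                  -- IndexError (unreachable: i_node is in range)
      | some (level, lo0, hi0) =>
        let lo := pvAbs lo0
        let hi := pvAbs hi0
        if level > 0 then
          match bead.get? lo, bead.get? hi, PySem.List.pyGet? L lo, PySem.List.pyGet? L hi with
          | some lo_bead, some hi_bead, some (l0, _), some (l1, _) =>
              bead.insert i_node
                (pyStrMul lo_bead (pyPow2 (level - l0 - 1)) ++ pyStrMul hi_bead (pyPow2 (level - l1 - 1)))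
          | _, _, _, _ => bead        -- KeyError / IndexError (excluded by Pre_to_TT)
        else bead) bead
  ((bead.get? 0).getD "")             -- bead[0]; KeyError excluded by Pre_to_TT

-- ===== PORT B =====
-- B-side copies of the same Python operator primitives (builtin abs, s * k, 2 ** d)
def pvAbsB (x : Int) : Int := if x ≥ 0 then x else -x
def pyStrMulB (s : String) (k : Int) : String := String.join (List.replicate k.toNat s)
def pyPow2B (d : Int) : Int := 2 ^ d.toNat
-- the recursive helper solve(i) of Source B; the memo dict is threaded through,
-- fuel only makes the recursion total (Pre_to_TT guarantees it never runs out)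
def to_TT_altGo (L : List (Int × (Int × Int))) :
    ℕ → Int → PySem.Dict Int String → String × PySem.Dict Int String
  | 0, _, memo => ("", memo)
  | (f + 1), i, memo =>
    match memo.get? i with
    | some s => (s, memo)
    | none =>
      match PySem.List.pyGet? L i with
      | none => ("", memo)            -- IndexError (excluded by Pre_to_TT)
      | some node =>
        let level := node.1
        let lo := pvAbsB node.2.1
        let hi := pvAbsB node.2.2
        let r1 := to_TT_altGo L f lo memo
        let r2 := to_TT_altGo L f hi r1.2
        match PySem.List.pyGet? L lo with
        | none => ("", r2.2)          -- IndexError (excluded by Pre_to_TT)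
        | some e0 =>
          match PySem.List.pyGet? L hi with
          | none => ("", r2.2)        -- IndexError (excluded by Pre_to_TT)
          | some e1 =>
            let res := pyStrMulB r1.1 (pyPow2B (level - e0.1 - 1)) ++ pyStrMulB r2.1 (pyPow2B (level - e1.1 - 1))
            (res, r2.2.insert i res)

def to_TT_alt (L : List (Int × (Int × Int))) : String :=
  let n : Int := (L.length : Int)
  let memo : PySem.Dict Int String := (PySem.Dict.empty.insert (n - 1) "0").insert (n - 2) "1"
  (to_TT_altGo L (L.length + 1) 0 memo).1

-- ===== PRECONDITION & SPEC =====
-- level stored at slot c (slots referenced by Pre_ are always in range)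
def pvAbsP (x : Int) : Int := if x ≥ 0 then x else -x
def pvLev (L : List (Int × (Int × Int))) (c : Int) : Int :=
  ((PySem.List.pyGet? L c).getD (0, (0, 0))).1
-- a child pointer that A can look up in bead: a terminal, or a node A has built
def pvChildOk (L : List (Int × (Int × Int))) (c : Int) : Prop :=
  c = (L.length : Int) - 1 ∨ c = (L.length : Int) - 2 ∨ 0 < pvLev L c
-- Pre_to_TT is exactly the set of inputs on which A returns: elsewhere A raises
-- (KeyError on a missing/skipped/not-yet-built bead entry, IndexError on an
-- out-of-range child, TypeError from s * 2**d with d < 0, KeyError on bead[0]).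
def pvChildCond (L : List (Int × (Int × Int))) (i c : Int) : Prop :=
  i < c ∧ c < (L.length : Int) ∧ pvChildOk L c ∧ 0 ≤ pvLev L i - pvLev L c - 1
def Pre_to_TT (L : List (Int × (Int × Int))) : Prop :=
  1 ≤ L.length ∧ (3 ≤ L.length → 0 < pvLev L 0) ∧
  ∀ j < L.length - 2,
    0 < pvLev L (j : Int) →
      pvChildCond L (j : Int) (pvAbsP ((PySem.List.pyGet? L (j : Int)).getD (0, (0, 0))).2.1) ∧
      pvChildCond L (j : Int) (pvAbsP ((PySem.List.pyGet? L (j : Int)).getD (0, (0, 0))).2.2)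
instance (L : List (Int × (Int × Int))) : Decidable (Pre_to_TT L) := by unfold Pre_to_TT pvChildCond pvChildOk; infer_instance

def pvWitness_to_TT : (List (Int × (Int × Int))) :=
  [(2, (1, 2)), (1, (3, 2)), (0, (0, 0)), (0, (0, 0))]

def Spec_to_TT (L : List (Int × (Int × Int))) (out : String) : Prop := out = to_TT_alt L
instance (L : List (Int × (Int × Int))) (out : String) : Decidable (Spec_to_TT L out) := by unfold Spec_to_TT; infer_instance

-- ===== CLAIM (what is proved, stated in full; the proofs are below) =====
def Claim_equal_to_TT : Prop := ∀ (L : List (Int × (Int × Int))), Dom_to_TT L → Pre_to_TT L → Spec_to_TT L (to_TT L)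

-- ===== LEMMAS AND PROOFS =====

lemma pvAbsB_eq : pvAbsB = pvAbs := rfl
lemma pyStrMulB_eq : pyStrMulB = pyStrMul := rfl
lemma pyPow2B_eq : pyPow2B = pyPow2 := rfl

-- the common value of both programs at node i (fuel-indexed truth-table string)
def pvV (L : List (Int × (Int × Int))) : ℕ → Int → String
  | 0, _ => ""
  | (f + 1), i =>
    if i = (L.length : Int) - 1 then "0"
    else if i = (L.length : Int) - 2 then "1"
    else
      match PySem.List.pyGet? L i with
      | none => ""
      | some (level, lo0, hi0) =>
        match PySem.List.pyGet? L (pvAbs lo0), PySem.List.pyGet? L (pvAbs hi0) with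
        | some (l0, _), some (l1, _) =>
            pyStrMul (pvV L f (pvAbs lo0)) (pyPow2 (level - l0 - 1)) ++
            pyStrMul (pvV L f (pvAbs hi0)) (pyPow2 (level - l1 - 1))
        | _, _ => ""

-- the nodes that end up in A's bead dict / that B's recursion may visit
def pvGood (L : List (Int × (Int × Int))) (i : Int) : Prop :=
  i = (L.length : Int) - 1 ∨ i = (L.length : Int) - 2 ∨
  (0 ≤ i ∧ i < (L.length : Int) - 2 ∧ 0 < pvLev L i)

lemma pvLev_eq (L : List (Int × (Int × Int))) (i : Int) (e : Int × (Int × Int))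
    (h : PySem.List.pyGet? L i = some e) : pvLev L i = e.1 := by
  simp [pvLev, h]

lemma pvGet_of_inrange (L : List (Int × (Int × Int))) (i : Int) (h0 : 0 ≤ i)
    (h1 : i < (L.length : Int)) :
    PySem.List.pyGet? L i = some ((PySem.List.pyGet? L i).getD (0, (0, 0))) := by
  have hlen : i < ((L.length : Int)) := h1
  have h := PySem.List.pyGet?_eq_some_getElem L h0 hlen
  rw [h]
  simp

-- unpack Pre_to_TT at a non-terminal node
lemma pre_at (L : List (Int × (Int × Int))) (hP : Pre_to_TT L) (i : Int)
    (h0 : 0 ≤ i) (h1 : i < (L.length : Int) - 2) (hlev : 0 < pvLev L i)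
    (e : Int × (Int × Int)) (he : PySem.List.pyGet? L i = some e) :
    pvChildCond L i (pvAbs e.2.1) ∧ pvChildCond L i (pvAbs e.2.2) := by
  obtain ⟨-, -, h⟩ := hP
  have hj : i.toNat < L.length - 2 := by omega
  have := h i.toNat hj
  have hi : ((i.toNat : Nat) : Int) = i := by omega
  rw [hi, he] at this
  exact this hlev

lemma pvAbs_nonneg (x : Int) : 0 ≤ pvAbs x := by
  unfold pvAbs; split <;> omega

-- a good child of a good node is good
lemma good_child (L : List (Int × (Int × Int))) (i c : Int) (h0 : 0 ≤ c)
    (hc : pvChildCond L i c) : pvGood L c := by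
  obtain ⟨h1, h2, h3, -⟩ := hc
  by_cases hA : c = (L.length : Int) - 1
  · exact Or.inl hA
  by_cases hB : c = (L.length : Int) - 2
  · exact Or.inr (Or.inl hB)
  rcases h3 with h | h | h
  · exact absurd h hA
  · exact absurd h hB
  · exact Or.inr (Or.inr ⟨h0, by omega, h⟩)

-- fuel stability of pvV on good nodes
lemma pvV_stable (L : List (Int × (Int × Int))) (hP : Pre_to_TT L) :
    ∀ (k f g : ℕ) (i : Int), pvGood L i → ((L.length : Int) - i).toNat ≤ k →
      k < f → k < g → pvV L f i = pvV L g i := by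
  intro k
  induction k with
  | zero =>
    intro f g i hg hk _ _
    exfalso
    rcases hg with h | h | h <;> omega
  | succ k ih =>
    intro f g i hg hk hf hgg
    match f, g with
    | (f' + 1), (g' + 1) =>
    by_cases h1 : i = (L.length : Int) - 1
    · simp [pvV, h1]
    by_cases h2 : i = (L.length : Int) - 2
    · simp [pvV, h2]
    rcases hg with h | h | h
    · exact absurd h h1
    · exact absurd h h2
    obtain ⟨hi0, hi1, hilev⟩ := h
    rcases hE : PySem.List.pyGet? L i with _ | ⟨lev, lo0, hi0'⟩
    · rw [pvGet_of_inrange L i hi0 (by omega)] at hE; exact absurd hE (by simp)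
    have hpre := pre_at L hP i hi0 hi1 hilev _ hE
    obtain ⟨hcl, hch⟩ := hpre
    simp only [] at hcl hch
    have hlo := good_child L i _ (pvAbs_nonneg lo0) hcl
    have hhi := good_child L i _ (pvAbs_nonneg hi0') hch
    obtain ⟨hllt, hlub, -, -⟩ := hcl
    obtain ⟨hhlt, hhub, -, -⟩ := hch
    rcases hEl : PySem.List.pyGet? L (pvAbs lo0) with _ | el
    · rw [pvGet_of_inrange L _ (pvAbs_nonneg lo0) hlub] at hEl; exact absurd hEl (by simp)
    rcases hEh : PySem.List.pyGet? L (pvAbs hi0') with _ | eh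
    · rw [pvGet_of_inrange L _ (pvAbs_nonneg hi0') hhub] at hEh; exact absurd hEh (by simp)
    have r1 : pvV L f' (pvAbs lo0) = pvV L g' (pvAbs lo0) :=
      ih f' g' _ hlo (by omega) (by omega) (by omega)
    have r2 : pvV L f' (pvAbs hi0') = pvV L g' (pvAbs hi0') :=
      ih f' g' _ hhi (by omega) (by omega) (by omega)
    simp only [pvV, h1, h2, if_false, hE, hEl, hEh, r1, r2]

-- ===== part A: the loop invariant =====

def pvInit (L : List (Int × (Int × Int))) : PySem.Dict Int String :=
  (PySem.Dict.empty.insert ((L.length : Int) - 1) "0").insert ((L.length : Int) - 2) "1"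

def pvStepA (L : List (Int × (Int × Int))) :
    PySem.Dict Int String → Int → PySem.Dict Int String := fun bead i_node =>
    if bead.contains i_node then bead
    else
      match PySem.List.pyGet? L i_node with
      | none => bead
      | some (level, lo0, hi0) =>
        let lo := pvAbs lo0
        let hi := pvAbs hi0
        if level > 0 then
          match bead.get? lo, bead.get? hi, PySem.List.pyGet? L lo, PySem.List.pyGet? L hi with
          | some lo_bead, some hi_bead, some (l0, _), some (l1, _) =>
              bead.insert i_node
                (pyStrMul lo_bead (pyPow2 (level - l0 - 1)) ++ pyStrMul hi_bead (pyPow2 (level - l1 - 1)))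
          | _, _, _, _ => bead
        else bead

lemma to_TT_eq_fold (L : List (Int × (Int × Int))) :
    to_TT L = (((PySem.List.pyRange ((L.length : Int) - 3) (-1) (-1)).foldl (pvStepA L) (pvInit L)).get? 0).getD "" := rfl

def pvInvA (L : List (Int × (Int × Int))) (k : Int) (bead : PySem.Dict Int String) : Prop :=
  ∀ j : Int, bead.get? j =
    if j = (L.length : Int) - 1 then some "0"
    else if j = (L.length : Int) - 2 then some "1"
    else if k ≤ j ∧ j < (L.length : Int) - 2 ∧ 0 < pvLev L j then some (pvV L (L.length + 1) j)
    else none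

lemma invA_init (L : List (Int × (Int × Int))) (_h1 : 1 ≤ L.length) :
    pvInvA L ((L.length : Int) - 2) (pvInit L) := by
  intro j
  simp only [pvInit, PySem.Dict.get?_insert, PySem.Dict.get?_empty]
  split_ifs <;> first | rfl | omega

-- the bead dict of the invariant holds pvV at every good key ≥ k
lemma invA_get_good (L : List (Int × (Int × Int))) (k : Int) (bead : PySem.Dict Int String)
    (hInv : pvInvA L k bead) (j : Int) (hg : pvGood L j) (hk : k ≤ j) :
    bead.get? j = some (pvV L (L.length + 1) j) := by
  rw [hInv j]
  rcases hg with h | h | h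
  · rw [if_pos h, h]
    simp [pvV]
  · have hne : ¬ j = (L.length : Int) - 1 := by omega
    rw [if_neg hne, if_pos h, h]
    have : ¬ ((L.length : Int) - 2 = (L.length : Int) - 1) := by omega
    simp [pvV, this]
  · obtain ⟨h0, h1, h2⟩ := h
    rw [if_neg (by omega), if_neg (by omega), if_pos ⟨hk, h1, h2⟩]

lemma invA_step (L : List (Int × (Int × Int))) (hP : Pre_to_TT L) (k : Int)
    (h0 : 0 ≤ k) (h1 : k < (L.length : Int) - 2) (bead : PySem.Dict Int String)
    (hInv : pvInvA L (k + 1) bead) : pvInvA L k (pvStepA L bead k) := by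
  have hknone : bead.get? k = none := by
    rw [hInv k]
    have c1 : ¬ k = (L.length : Int) - 1 := by omega
    have c2 : ¬ k = (L.length : Int) - 2 := by omega
    have c3 : ¬ (k + 1 ≤ k ∧ k < (L.length : Int) - 2 ∧ 0 < pvLev L k) := by omega
    rw [if_neg c1, if_neg c2, if_neg c3]
  have hkc : bead.contains k = false := by
    rw [PySem.Dict.contains_eq_isSome_get?, hknone]; rfl
  rcases hE : PySem.List.pyGet? L k with _ | ⟨lev, lo0, hi0⟩
  · rw [pvGet_of_inrange L k h0 (by omega)] at hE; exact absurd hE (by simp)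
  have hlevk : pvLev L k = lev := pvLev_eq L k _ hE
  unfold pvStepA
  rw [hkc, hE]
  simp only [Bool.false_eq_true, if_false]
  by_cases hlev : lev > 0
  · -- the node is built and inserted
    have hpre := pre_at L hP k h0 h1 (by omega) _ hE
    obtain ⟨hcl, hch⟩ := hpre
    simp only [] at hcl hch
    have hlo := good_child L k _ (pvAbs_nonneg lo0) hcl
    have hhi := good_child L k _ (pvAbs_nonneg hi0) hch
    obtain ⟨hllt, hlub, -, -⟩ := hcl
    obtain ⟨hhlt, hhub, -, -⟩ := hch
    have hgl : bead.get? (pvAbs lo0) = some (pvV L (L.length + 1) (pvAbs lo0)) :=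
      invA_get_good L (k + 1) bead hInv _ hlo (by omega)
    have hgh : bead.get? (pvAbs hi0) = some (pvV L (L.length + 1) (pvAbs hi0)) :=
      invA_get_good L (k + 1) bead hInv _ hhi (by omega)
    rcases hEl : PySem.List.pyGet? L (pvAbs lo0) with _ | el
    · rw [pvGet_of_inrange L _ (pvAbs_nonneg lo0) hlub] at hEl; exact absurd hEl (by simp)
    rcases hEh : PySem.List.pyGet? L (pvAbs hi0) with _ | eh
    · rw [pvGet_of_inrange L _ (pvAbs_nonneg hi0) hhub] at hEh; exact absurd hEh (by simp)
    rw [if_pos hlev, hgl, hgh]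
    obtain ⟨l0, dl⟩ := el
    obtain ⟨l1, dh⟩ := eh
    show pvInvA L k (bead.insert k
      (pyStrMul (pvV L (L.length + 1) (pvAbs lo0)) (pyPow2 (lev - l0 - 1)) ++
       pyStrMul (pvV L (L.length + 1) (pvAbs hi0)) (pyPow2 (lev - l1 - 1))))
    have hres : pyStrMul (pvV L (L.length + 1) (pvAbs lo0)) (pyPow2 (lev - l0 - 1)) ++
        pyStrMul (pvV L (L.length + 1) (pvAbs hi0)) (pyPow2 (lev - l1 - 1)) =
        pvV L (L.length + 1) k := by
      have hstep : pvV L (L.length + 1 + 1) k =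
          pyStrMul (pvV L (L.length + 1) (pvAbs lo0)) (pyPow2 (lev - l0 - 1)) ++
          pyStrMul (pvV L (L.length + 1) (pvAbs hi0)) (pyPow2 (lev - l1 - 1)) := by
        simp only [pvV, hE, hEl, hEh]
        rw [if_neg (by omega : ¬ k = (L.length : Int) - 1),
            if_neg (by omega : ¬ k = (L.length : Int) - 2)]
      rw [← hstep]
      exact pvV_stable L hP L.length _ _ k (Or.inr (Or.inr ⟨h0, h1, by omega⟩))
        (by omega) (by omega) (by omega)
    rw [hres]
    intro j
    by_cases hjk : j = k
    · subst hjk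
      rw [PySem.Dict.get?_insert_self]
      rw [if_neg (by omega), if_neg (by omega), if_pos ⟨le_refl j, h1, by omega⟩]
    · rw [PySem.Dict.get?_insert_of_ne bead _ hjk, hInv j]
      split_ifs <;> first | rfl | omega
  · -- level ≤ 0: the node is skipped
    rw [if_neg hlev]
    intro j
    rw [hInv j]
    by_cases hjk : j = k
    · subst hjk
      split_ifs <;> first | rfl | omega
    · split_ifs <;> first | rfl | omega

lemma countdown_snoc (a b : Int) (h : b ≤ a) :
    PySem.List.pyRange a (b - 1) (-1) = PySem.List.pyRange a b (-1) ++ [b] := by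
  rw [PySem.List.pyRange_neg_one_eq_reverse, PySem.List.pyRange_neg_one_eq_reverse]
  have hb : b - 1 + 1 = b := by omega
  rw [hb, PySem.List.pyRange_one_cons (by omega : b < a + 1)]
  simp

lemma invA_fold (L : List (Int × (Int × Int))) (hP : Pre_to_TT L) (h2 : 2 ≤ L.length) :
    ∀ k : Int, 0 ≤ k → k ≤ (L.length : Int) - 2 →
      pvInvA L k ((PySem.List.pyRange ((L.length : Int) - 3) (k - 1) (-1)).foldl (pvStepA L) (pvInit L)) := by
  have main : ∀ (t : ℕ) (k : Int), 0 ≤ k → k ≤ (L.length : Int) - 2 →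
      ((L.length : Int) - 2 - k).toNat = t →
      pvInvA L k ((PySem.List.pyRange ((L.length : Int) - 3) (k - 1) (-1)).foldl (pvStepA L) (pvInit L)) := by
    intro t
    induction t with
    | zero =>
      intro k hk0 hk2 ht
      have hk : k = (L.length : Int) - 2 := by omega
      subst hk
      rw [PySem.List.pyRange_neg_one_eq_nil (by omega)]
      exact invA_init L (by omega)
    | succ t ih =>
      intro k hk0 hk2 ht
      have hlt : k < (L.length : Int) - 2 := by omega
      have hprev := ih (k + 1) (by omega) (by omega) (by omega)
      have hsplit : PySem.List.pyRange ((L.length : Int) - 3) (k - 1) (-1) =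
          PySem.List.pyRange ((L.length : Int) - 3) k (-1) ++ [k] := countdown_snoc _ _ (by omega)
      rw [hsplit, List.foldl_append]
      have hk1 : k + 1 - 1 = k := by omega
      rw [hk1] at hprev
      simpa using invA_step L hP k hk0 hlt _ hprev
  intro k hk0 hk2
  exact main ((L.length : Int) - 2 - k).toNat k hk0 hk2 rfl

-- ===== part B: the memo invariant =====

def pvMemoInv (L : List (Int × (Int × Int))) (memo : PySem.Dict Int String) : Prop :=
  memo.get? ((L.length : Int) - 1) = some "0" ∧
  memo.get? ((L.length : Int) - 2) = some "1" ∧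
  ∀ (j : Int) (s : String), memo.get? j = some s → pvGood L j ∧ s = pvV L (L.length + 1) j

lemma altGo_correct (L : List (Int × (Int × Int))) (hP : Pre_to_TT L) :
    ∀ (f : ℕ) (i : Int) (memo : PySem.Dict Int String), pvMemoInv L memo → pvGood L i →
      (((L.length : Int) - i)).toNat < f →
      (to_TT_altGo L f i memo).1 = pvV L (L.length + 1) i ∧ pvMemoInv L (to_TT_altGo L f i memo).2 := by
  intro f
  induction f with
  | zero => intro i memo _ _ hf; exact absurd hf (by omega)
  | succ f ih =>
    intro i memo hM hg hf
    rcases hm : memo.get? i with _ | s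
    · -- cache miss: i is not a terminal (terminals are always cached)
      have hi1 : ¬ i = (L.length : Int) - 1 := fun h => by rw [h, hM.1] at hm; cases hm
      have hi2 : ¬ i = (L.length : Int) - 2 := fun h => by rw [h, hM.2.1] at hm; cases hm
      rcases hg with h | h | h
      · exact absurd h hi1
      · exact absurd h hi2
      obtain ⟨hi0, hilt, hilev⟩ := h
      rcases hE : PySem.List.pyGet? L i with _ | ⟨lev, lo0, hi0'⟩
      · rw [pvGet_of_inrange L i hi0 (by omega)] at hE; exact absurd hE (by simp)
      have hpre := pre_at L hP i hi0 hilt hilev _ hE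
      obtain ⟨hcl, hch⟩ := hpre
      simp only [] at hcl hch
      have hlo := good_child L i _ (pvAbs_nonneg lo0) hcl
      have hhi := good_child L i _ (pvAbs_nonneg hi0') hch
      obtain ⟨hllt, hlub, -, -⟩ := hcl
      obtain ⟨hhlt, hhub, -, -⟩ := hch
      rcases hEl : PySem.List.pyGet? L (pvAbs lo0) with _ | ⟨l0, dl⟩
      · rw [pvGet_of_inrange L _ (pvAbs_nonneg lo0) hlub] at hEl; exact absurd hEl (by simp)
      rcases hEh : PySem.List.pyGet? L (pvAbs hi0') with _ | ⟨l1, dh⟩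
      · rw [pvGet_of_inrange L _ (pvAbs_nonneg hi0') hhub] at hEh; exact absurd hEh (by simp)
      have r1 := ih (pvAbs lo0) memo hM hlo (by omega)
      have r2 := ih (pvAbs hi0') (to_TT_altGo L f (pvAbs lo0) memo).2 r1.2 hhi (by omega)
      have hgoal : to_TT_altGo L (f + 1) i memo =
          (pvV L (L.length + 1) i,
           (to_TT_altGo L f (pvAbs hi0') (to_TT_altGo L f (pvAbs lo0) memo).2).2.insert i
             (pvV L (L.length + 1) i)) := by
        have hres : pyStrMul (to_TT_altGo L f (pvAbs lo0) memo).1 (pyPow2 (lev - l0 - 1)) ++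
            pyStrMul (to_TT_altGo L f (pvAbs hi0') (to_TT_altGo L f (pvAbs lo0) memo).2).1
              (pyPow2 (lev - l1 - 1)) = pvV L (L.length + 1) i := by
          rw [r1.1, r2.1]
          have hstep : pvV L (L.length + 1 + 1) i =
              pyStrMul (pvV L (L.length + 1) (pvAbs lo0)) (pyPow2 (lev - l0 - 1)) ++
              pyStrMul (pvV L (L.length + 1) (pvAbs hi0')) (pyPow2 (lev - l1 - 1)) := by
            simp only [pvV, hE, hEl, hEh]
            rw [if_neg hi1, if_neg hi2]
          rw [← hstep]
          exact pvV_stable L hP L.length _ _ i (Or.inr (Or.inr ⟨hi0, hilt, hilev⟩))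
            (by omega) (by omega) (by omega)
        simp only [to_TT_altGo, pvAbsB_eq, pyStrMulB_eq, pyPow2B_eq, hm, hE, hEl, hEh]
        rw [hres]
      rw [hgoal]
      refine ⟨rfl, ?_, ?_, ?_⟩
      · rw [PySem.Dict.get?_insert_of_ne _ _ (fun h => hi1 h.symm)]
        exact r2.2.1
      · rw [PySem.Dict.get?_insert_of_ne _ _ (fun h => hi2 h.symm)]
        exact r2.2.2.1
      · intro j s hjs
        by_cases hjk : j = i
        · subst hjk
          rw [PySem.Dict.get?_insert_self] at hjs
          cases hjs
          exact ⟨Or.inr (Or.inr ⟨hi0, hilt, hilev⟩), rfl⟩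
        · rw [PySem.Dict.get?_insert_of_ne _ _ hjk] at hjs
          exact r2.2.2.2 j s hjs
    · -- cache hit
      have h := hM.2.2 i s hm
      have : to_TT_altGo L (f + 1) i memo = (s, memo) := by
        simp only [to_TT_altGo, hm]
      rw [this]
      exact ⟨h.2.symm ▸ rfl, hM⟩


-- ===== VERDICT (by name: the statement is the Claim_ definition above) =====
-- the initial two-entry dict satisfies the memo invariant
lemma memoInv_init (L : List (Int × (Int × Int))) : pvMemoInv L (pvInit L) := by
  have hne : ((L.length : Int) - 1) ≠ ((L.length : Int) - 2) := by omega
  refine ⟨?_, ?_, ?_⟩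
  · rw [pvInit, PySem.Dict.get?_insert_of_ne _ _ hne, PySem.Dict.get?_insert_self]
  · rw [pvInit, PySem.Dict.get?_insert_self]
  · intro j s hjs
    rw [pvInit, PySem.Dict.get?_insert] at hjs
    by_cases h2 : j = (L.length : Int) - 2
    · rw [if_pos h2] at hjs
      cases hjs
      refine ⟨Or.inr (Or.inl h2), ?_⟩
      have : ¬ ((L.length : Int) - 2 = (L.length : Int) - 1) := by omega
      simp [pvV, h2, this]
    · rw [if_neg h2, PySem.Dict.get?_insert] at hjs
      by_cases h1 : j = (L.length : Int) - 1
      · rw [if_pos h1] at hjs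
        cases hjs
        exact ⟨Or.inl h1, by simp [pvV, h1]⟩
      · rw [if_neg h1] at hjs
        simp [PySem.Dict.get?_empty] at hjs
lemma good_zero (L : List (Int × (Int × Int))) (hP : Pre_to_TT L) : pvGood L 0 := by
  obtain ⟨hn1, hn3, -⟩ := hP
  by_cases h1 : L.length = 1
  · exact Or.inl (by omega)
  by_cases h2 : L.length = 2
  · exact Or.inr (Or.inl (by omega))
  · exact Or.inr (Or.inr ⟨le_refl 0, by omega, hn3 (by omega)⟩)

lemma alt_eq_pvV (L : List (Int × (Int × Int))) (hP : Pre_to_TT L) :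
    to_TT_alt L = pvV L (L.length + 1) 0 := by
  have h := altGo_correct L hP (L.length + 1) 0 (pvInit L) (memoInv_init L)
    (good_zero L hP) (by omega)
  exact h.1

lemma a_eq_pvV (L : List (Int × (Int × Int))) (hP : Pre_to_TT L) :
    to_TT L = pvV L (L.length + 1) 0 := by
  have hn1 := hP.1
  rw [to_TT_eq_fold]
  by_cases h1 : L.length = 1
  · -- n = 1: the loop body is empty, bead[0] is the terminal "0"
    have hr : PySem.List.pyRange ((L.length : Int) - 3) (-1) (-1) = [] :=
      PySem.List.pyRange_neg_one_eq_nil (by omega)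
    rw [hr]
    simp only [List.foldl_nil]
    have hg := invA_get_good L ((L.length : Int) - 2) (pvInit L) (invA_init L (by omega)) 0
      (Or.inl (by omega)) (by omega)
    rw [hg]
    rfl
  · have hInv := invA_fold L hP (by omega) 0 (le_refl 0) (by omega)
    have h01 : (0 : Int) - 1 = -1 := by omega
    rw [h01] at hInv
    rw [invA_get_good L 0 _ hInv 0 (good_zero L hP) (le_refl 0)]
    rfl

theorem to_TT_spec : Claim_equal_to_TT := by
  intro L _hD hP
  unfold Spec_to_TT
  rw [a_eq_pvV L hP, alt_eq_pvV L hP]
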